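-- pv_equiv track=rewrite | github.com/gUBII/clcod | relay.py | parse_codex
-- ===== SOURCE A (Python) =====
-- def parse_codex(raw: str) -> str:
--     lines = raw.strip().splitlines()
--     response: list[str] = []
--     capture = False
--     for line in lines:
--         stripped = line.strip()
--         if stripped == "codex":
--             capture = True
--             continue
--         if capture:
--             if stripped.startswith("tokens used"):
--                 break
--             response.append(line)
--
--     text = "\n".join(response).strip()
--     if text:
--         return text
--
--     skip_prefixes = (
--         "OpenAI",
--         "--------",
--         "workdir:",
--         "model:",
--         "provider:",
--         "approval:",
--         "sandbox:",
--         "reasoning",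
--         "session id:",
--         "user",
--         "mcp startup:",
--         "thinking",
--         "codex",
--         "tokens used",
--     )
--     for line in reversed(lines):
--         stripped = line.strip()
--         if not stripped or stripped.startswith("**"):
--             continue
--         if any(stripped.startswith(prefix) for prefix in skip_prefixes):
--             continue
--         try:
--             int(stripped.replace(",", ""))
--             continue
--         except ValueError:
--             return stripped
--     return ""
-- ===== SOURCE B (Python) =====
-- _SKIP_PREFIXES = (
--     "OpenAI",
--     "--------",
--     "workdir:",
--     "model:",
--     "provider:",
--     "approval:",
--     "sandbox:",
--     "reasoning",
--     "session id:",
--     "user",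
--     "mcp startup:",
--     "thinking",
--     "codex",
--     "tokens used",
-- )
--
--
-- def _is_intlike(s: str) -> bool:
--     try:
--         int(s)
--         return True
--     except ValueError:
--         return False
--
--
-- def _keep(s: str) -> bool:
--     return (
--         bool(s)
--         and not s.startswith("**")
--         and not any(s.startswith(p) for p in _SKIP_PREFIXES)
--         and not _is_intlike(s.replace(",", ""))
--     )
--
--
-- def parse_codex(raw: str) -> str:
--     # One fused forward pass: a 3-state automaton (BEFORE/IN/AFTER) collects the
--     # codex body while the same traversal tracks the last fallback candidate.
--     BEFORE, IN, AFTER = 0, 1, 2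
--     state = BEFORE
--     body: list[str] = []
--     last = ""
--     for line in raw.strip().splitlines():
--         s = line.strip()
--         if s == "codex":
--             if state == BEFORE:
--                 state = IN
--         elif state == IN:
--             if s.startswith("tokens used"):
--                 state = AFTER
--             else:
--                 body.append(line)
--         if _keep(s):
--             last = s
--     text = "\n".join(body).strip()
--     return text if text else last
-- ===== Notes on version B (the rewrite author's own statement) =====
-- stated objective: alternative
-- what changed: Replaces A's two staged traversals (capture-flag loop with break, then a reversed early-return scan with try/except) by ONE fused forward pass: an explicit 3-state automaton (BEFORE/IN/AFTER) collecting the body while the same traversal maintains the last qualifying fallback line; the final value is selected after the single pass.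
import Mathlib
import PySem

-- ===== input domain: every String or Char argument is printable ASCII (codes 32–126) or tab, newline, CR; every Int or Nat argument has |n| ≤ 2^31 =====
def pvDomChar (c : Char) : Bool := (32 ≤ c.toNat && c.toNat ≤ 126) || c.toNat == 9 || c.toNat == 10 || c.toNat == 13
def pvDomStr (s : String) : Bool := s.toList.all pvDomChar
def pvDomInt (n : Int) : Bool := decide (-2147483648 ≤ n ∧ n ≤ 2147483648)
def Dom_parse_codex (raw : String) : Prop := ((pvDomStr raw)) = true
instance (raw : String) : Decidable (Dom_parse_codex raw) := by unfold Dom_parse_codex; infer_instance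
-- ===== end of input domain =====

-- B fuses A's two staged traversals (capture-flag loop with break, then a reversed
-- early-return scan) into ONE forward pass: a 3-state automaton collecting the body
-- while the same traversal tracks the last fallback candidate; objective: alternative.

def pvSkipPrefixes : List String :=
  ["OpenAI", "--------", "workdir:", "model:", "provider:", "approval:",
   "sandbox:", "reasoning", "session id:", "user", "mcp startup:",
   "thinking", "codex", "tokens used"]

-- ===== PORT A =====
-- A's capture-flag loop (break at "tokens used" once capturing)
def pvCaptureA : List String → Bool → List String
  | [], _ => []
  | l :: rest, capture =>
    let s := PySem.Str.strip l
    if s = "codex" then pvCaptureA rest true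
    else if capture then
      if PySem.Str.startswith s "tokens used" then []
      else l :: pvCaptureA rest capture
    else pvCaptureA rest capture

-- A's fallback: scan reversed(lines), return the first line passing all filters
def pvRevScanA : List String → String
  | [] => ""
  | l :: rest =>
    let s := PySem.Str.strip l
    if s = "" then pvRevScanA rest
    else if PySem.Str.startswith s "**" then pvRevScanA rest
    else if pvSkipPrefixes.any (fun p => PySem.Str.startswith s p) then pvRevScanA rest
    else if (PySem.Int.ofStr? (PySem.Str.replace s "," "")).isSome then pvRevScanA rest
    else s

def parse_codex (raw : String) : String :=
  let lines := PySem.Str.splitlines (PySem.Str.strip raw)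
  let text := PySem.Str.strip (PySem.Str.join "\n" (pvCaptureA lines false))
  if text ≠ "" then text else pvRevScanA lines.reverse

-- ===== PORT B =====
def pvKeepB (s : String) : Bool :=
  (!(s = "")) && (!(PySem.Str.startswith s "**")) &&
  (!(pvSkipPrefixes.any (fun p => PySem.Str.startswith s p))) &&
  (!(PySem.Int.ofStr? (PySem.Str.replace s "," "")).isSome)

-- one step of B's fused automaton: state 0 = BEFORE, 1 = IN, 2 = AFTER
def pvStepB (acc : Nat × List String × String) (line : String) : Nat × List String × String :=
  let s := PySem.Str.strip line
  let sb : Nat × List String :=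
    if s = "codex" then (if acc.1 = 0 then (1, acc.2.1) else (acc.1, acc.2.1))
    else if acc.1 = 1 then
      (if PySem.Str.startswith s "tokens used" then (2, acc.2.1) else (1, acc.2.1 ++ [line]))
    else (acc.1, acc.2.1)
  (sb.1, sb.2, if pvKeepB s then s else acc.2.2)

def parse_codex_alt (raw : String) : String :=
  let fin := (PySem.Str.splitlines (PySem.Str.strip raw)).foldl pvStepB (0, [], "")
  let text := PySem.Str.strip (PySem.Str.join "\n" fin.2.1)
  if text ≠ "" then text else fin.2.2

-- ===== PRECONDITION & SPEC =====
def Spec_parse_codex (raw : String) (out : String) : Prop := out = parse_codex_alt raw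
instance (raw : String) (out : String) : Decidable (Spec_parse_codex raw out) := by unfold Spec_parse_codex; infer_instance

-- ===== CLAIM (what is proved, stated in full; the proofs are below) =====
def Claim_equal_parse_codex : Prop := ∀ (raw : String), Dom_parse_codex raw → Spec_parse_codex raw (parse_codex raw)

-- ===== LEMMAS AND PROOFS =====

-- the per-line filter chain of A equals one test of B's combined predicate
lemma pvChain (s r : String) :
    (if s = "" then r
     else if PySem.Str.startswith s "**" = true then r
     else if (pvSkipPrefixes.any fun p => PySem.Str.startswith s p) = true then r
     else if (PySem.Int.ofStr? (PySem.Str.replace s "," "")).isSome = true then r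
     else s) = if pvKeepB s = true then s else r := by
  simp only [pvKeepB]
  by_cases h1 : s = "" <;>
  by_cases h2 : PySem.Str.startswith s "**" = true <;>
  by_cases h3 : (pvSkipPrefixes.any fun p => PySem.Str.startswith s p) = true <;>
  by_cases h4 : (PySem.Int.ofStr? (PySem.Str.replace s "," "")).isSome = true <;>
  simp only [h1, h2, h3, h4, if_pos, if_neg, Bool.not_eq_true] at * <;>
  simp_all

-- the fallback slot of B's fold ignores the state and body slots
lemma pvFold_last (ls : List String) : ∀ (st : Nat) (b : List String) (l : String),
    (ls.foldl pvStepB (st, b, l)).2.2 =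
      (ls.map PySem.Str.strip).foldl (fun best s => if pvKeepB s then s else best) l := by
  induction ls with
  | nil => intro st b l; simp
  | cons x rest ih =>
    intro st b l
    simp only [List.foldl_cons, List.map_cons]
    have h : pvStepB (st, b, l) x =
        ((pvStepB (st, b, l) x).1, (pvStepB (st, b, l) x).2.1, (pvStepB (st, b, l) x).2.2) := rfl
    rw [h, ih]
    simp only [pvStepB]

-- A's reversed first-match scan equals a forward fold keeping the last match
lemma pvRevScan_eq_foldl (ls : List String) :
    pvRevScanA ls.reverse =
      (ls.map PySem.Str.strip).foldl (fun best s => if pvKeepB s then s else best) "" := by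
  induction ls using List.reverseRecOn with
  | nil => simp [pvRevScanA]
  | append_singleton xs x ih =>
    rw [List.reverse_append, List.map_append, List.foldl_append]
    simp only [List.reverse_singleton, List.singleton_append, List.map_cons, List.map_nil,
      List.foldl_cons, List.foldl_nil, pvRevScanA]
    rw [← ih, pvChain]

-- once in state AFTER, B's body slot is frozen
lemma pvFold_body2 (ls : List String) : ∀ (b : List String) (l : String),
    (ls.foldl pvStepB (2, b, l)).2.1 = b := by
  induction ls with
  | nil => intro b l; simp
  | cons x rest ih =>
    intro b l
    simp only [List.foldl_cons, pvStepB]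
    by_cases hc : PySem.Str.strip x = "codex" <;> simp [hc, ih]

-- in state IN, B's body slot collects exactly what A's capturing loop collects
lemma pvFold_body1 (ls : List String) : ∀ (b : List String) (l : String),
    (ls.foldl pvStepB (1, b, l)).2.1 = b ++ pvCaptureA ls true := by
  induction ls with
  | nil => intro b l; simp [pvCaptureA]
  | cons x rest ih =>
    intro b l
    simp only [List.foldl_cons, pvCaptureA]
    by_cases hc : PySem.Str.strip x = "codex"
    · simp only [pvStepB, hc]
      simp [ih]
    · by_cases hts : PySem.Str.startswith (PySem.Str.strip x) "tokens used" = true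
      · simp only [pvStepB, hc, hts]
        simp [pvFold_body2]
      · simp only [pvStepB, hc, hts]
        simp [ih]

-- in state BEFORE, B's body slot collects exactly what A's whole loop collects
lemma pvFold_body0 (ls : List String) : ∀ (b : List String) (l : String),
    (ls.foldl pvStepB (0, b, l)).2.1 = b ++ pvCaptureA ls false := by
  induction ls with
  | nil => intro b l; simp [pvCaptureA]
  | cons x rest ih =>
    intro b l
    simp only [List.foldl_cons, pvCaptureA]
    by_cases hc : PySem.Str.strip x = "codex"
    · simp only [pvStepB, hc]
      simp [pvFold_body1]
    · simp only [pvStepB, hc]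
      simp [ih]

-- ===== VERDICT (by name: the statement is the Claim_ definition above) =====
theorem parse_codex_spec : Claim_equal_parse_codex := by
  intro raw _
  show parse_codex raw = parse_codex_alt raw
  simp only [parse_codex, parse_codex_alt]
  rw [show ((PySem.Str.splitlines (PySem.Str.strip raw)).foldl pvStepB (0, [], "")).2.1
        = pvCaptureA (PySem.Str.splitlines (PySem.Str.strip raw)) false from by
      simpa using pvFold_body0 _ [] "",
    pvFold_last, pvRevScan_eq_foldl]
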